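-- pv_equiv track=rewrite | github.com/deepchem/deepchem | deepchem/utils/poly_converters.py | index_wildcards
-- ===== SOURCE A (Python) =====
-- def index_wildcards(psmiles_part: str) -> str:
--     """
--     This function is used to index the wildcard atoms in the PSMILES string.
--
--     Parameters
--     ----------
--     psmiles_part: str
--         The PSMILES string to be indexed.
--
--     Returns
--     -------
--     str
--         The indexed PSMILES string.
--     """
--     counter = 1
--     mod_psmiles = ""
--     for idx, char in enumerate(psmiles_part):
--         if char == "*":
--             mod_psmiles += "[" + str(counter) + "*" + "]"
--             counter += 1
--         else:
--             mod_psmiles += char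
--     return mod_psmiles
-- ===== SOURCE B (Python) =====
-- def index_wildcards(psmiles_part: str) -> str:
--     """Index wildcard atoms: replace each '*' with '[n*]', n = 1, 2, ...
--
--     Recursive partition-based decomposition: split off the text before the
--     first '*' in one step instead of scanning character by character.
--     """
--     def go(s: str, i: int) -> str:
--         head, sep, rest = s.partition("*")
--         if not sep:
--             return head
--         return head + "[" + str(i) + "*]" + go(rest, i + 1)
--
--     return go(psmiles_part, 1)
-- ===== Notes on version B (the rewrite author's own statement) =====
-- stated objective: simpler
-- what changed: Replaced the per-character enumerate loop with explicit counter state by a recursive decomposition that partitions the string at the first wildcard and interleaves indexed bracket tokens between the wildcard-free segments.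
import Mathlib
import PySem

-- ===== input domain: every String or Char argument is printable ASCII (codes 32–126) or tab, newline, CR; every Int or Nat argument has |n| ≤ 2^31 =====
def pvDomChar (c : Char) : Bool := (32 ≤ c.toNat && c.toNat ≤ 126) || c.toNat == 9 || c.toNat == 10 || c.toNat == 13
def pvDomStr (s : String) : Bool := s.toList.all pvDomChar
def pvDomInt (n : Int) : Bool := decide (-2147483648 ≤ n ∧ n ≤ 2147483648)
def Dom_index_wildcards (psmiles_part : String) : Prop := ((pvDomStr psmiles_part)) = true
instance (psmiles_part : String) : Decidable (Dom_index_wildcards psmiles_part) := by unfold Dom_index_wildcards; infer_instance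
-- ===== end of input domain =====

-- B replaces A's per-character scan+counter loop by a recursive partition on the first '*' (objective: simpler decomposition, same cost).

-- ===== PORT A =====
-- one loop step: state = (counter, mod_psmiles as List Char); idx is bound but unused, as in A
def iwStepA (st : Int × List Char) (ic : Int × Char) : Int × List Char :=
  if ic.2 = '*' then (st.1 + 1, st.2 ++ '[' :: PySem.Int.toChars st.1 ++ ['*', ']'])
  else (st.1, st.2 ++ [ic.2])

def index_wildcards (psmiles_part : String) : String :=
  String.ofList ((PySem.List.enumerate psmiles_part.toList 0).foldl iwStepA (1, [])).2

-- ===== PORT B =====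
-- s.partition('*') ported by hand as (takeWhile (· ≠ '*'), dropWhile (· ≠ '*')): exact for a
-- single-character separator — head is the text before the first '*', rest what follows it.
def iwGoB : List Char → Int → List Char
  | s, i =>
    let head := s.takeWhile (· ≠ '*')
    match hr : s.dropWhile (· ≠ '*') with
    | [] => head
    | _ :: rest => head ++ ('[' :: PySem.Int.toChars i ++ ['*', ']']) ++ iwGoB rest (i + 1)
termination_by s => s.length
decreasing_by
  have h := (List.dropWhile_sublist (p := fun c => decide (c ≠ '*')) (l := s)).length_le
  rw [hr] at h
  simp at h; omega

def index_wildcards_alt (psmiles_part : String) : String :=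
  String.ofList (iwGoB psmiles_part.toList 1)

-- ===== PRECONDITION & SPEC =====
def Spec_index_wildcards (psmiles_part : String) (out : String) : Prop := out = index_wildcards_alt psmiles_part
instance (psmiles_part : String) (out : String) : Decidable (Spec_index_wildcards psmiles_part out) := by unfold Spec_index_wildcards; infer_instance

-- ===== CLAIM (what is proved, stated in full; the proofs are below) =====
def Claim_equal_index_wildcards : Prop := ∀ (psmiles_part : String), Dom_index_wildcards psmiles_part → Spec_index_wildcards psmiles_part (index_wildcards psmiles_part)

-- ===== LEMMAS AND PROOFS =====

theorem iw_enumerate_append {α : Type} (xs ys : List α) (s : Int) :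
    PySem.List.enumerate (xs ++ ys) s
      = PySem.List.enumerate xs s ++ PySem.List.enumerate ys (s + xs.length) := by
  induction xs generalizing s with
  | nil => simp [PySem.List.enumerate_nil]
  | cons x xs ih =>
      simp [PySem.List.enumerate_cons, ih (s + 1)]
      ring_nf

-- folding A's step over a star-free segment appends it and keeps the counter
theorem iw_fold_starfree (l : List Char) (h : ∀ c ∈ l, c ≠ '*') (k : Int) (acc : List Char)
    (idx : Int) :
    (PySem.List.enumerate l idx).foldl iwStepA (k, acc) = (k, acc ++ l) := by
  induction l generalizing acc idx with
  | nil => simp [PySem.List.enumerate_nil]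
  | cons c cs ih =>
      have hc : c ≠ '*' := h c (by simp)
      rw [PySem.List.enumerate_cons]
      simp only [List.foldl_cons, iwStepA, if_neg hc]
      rw [ih (fun d hd => h d (by simp [hd])) (acc ++ [c]) (idx + 1)]
      simp

theorem iw_fold_eq_goB (n : Nat) (l : List Char) (hn : l.length ≤ n) (k : Int)
    (acc : List Char) (idx : Int) :
    ((PySem.List.enumerate l idx).foldl iwStepA (k, acc)).2 = acc ++ iwGoB l k := by
  induction n generalizing l k acc idx with
  | zero =>
      have : l = [] := List.eq_nil_of_length_eq_zero (Nat.le_zero.mp hn)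
      subst this
      simp [PySem.List.enumerate_nil, iwGoB]
  | succ n ih =>
      rw [iwGoB]
      cases hr : l.dropWhile (fun c => c ≠ '*') with
      | nil =>
          have hl : l.takeWhile (fun c => c ≠ '*') = l := by
            have := List.takeWhile_append_dropWhile (p := fun c => decide (c ≠ '*')) (l := l)
            rw [hr] at this; simpa using this
          have hfree : ∀ c ∈ l, c ≠ '*' := by
            intro c hc
            have := List.mem_takeWhile_imp (by rw [hl]; exact hc)
            simpa using this
          rw [iw_fold_starfree l hfree k acc idx]
          have hpred : (fun x => !decide (x = '*')) = (fun c : Char => decide (c ≠ '*')) := by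
            funext x; simp
          simp [hpred, hl]
      | cons c rest =>
          have hsplit : l = l.takeWhile (fun c => c ≠ '*') ++ c :: rest := by
            have := List.takeWhile_append_dropWhile (p := fun c => decide (c ≠ '*')) (l := l)
            rw [hr] at this; exact this.symm
          have hc : c = '*' := by
            have := List.head?_dropWhile_not (p := fun c => decide (c ≠ '*')) (l := l)
            rw [hr] at this; simpa using this
          have hfree : ∀ d ∈ l.takeWhile (fun c => c ≠ '*'), d ≠ '*' := by
            intro d hd
            have := List.mem_takeWhile_imp hd
            simpa using this
          have hlen : rest.length ≤ n := by
            have h1 : (l.takeWhile (fun c => c ≠ '*') ++ c :: rest).length = l.length := by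
              rw [← hsplit]
            simp at h1
            omega
          conv_lhs => rw [hsplit]
          rw [iw_enumerate_append, List.foldl_append,
              iw_fold_starfree _ hfree k acc idx,
              PySem.List.enumerate_cons, List.foldl_cons]
          subst hc
          simp only [iwStepA]
          rw [if_pos trivial]
          rw [ih rest hlen (k + 1) _ _]
          simp

-- ===== VERDICT (by name: the statement is the Claim_ definition above) =====
theorem index_wildcards_spec : Claim_equal_index_wildcards := by
  intro s _
  unfold Spec_index_wildcards index_wildcards index_wildcards_alt
  rw [iw_fold_eq_goB s.toList.length s.toList le_rfl 1 [] 0]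
  simp
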